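-- pv_equiv track=rewrite | github.com/PRTRSEDIA/beneficiarios | CoFEE2SIGEFE.py | hace_match
-- ===== SOURCE A (Python) =====
-- from itertools import zip_longest
--
-- def hace_match(cof_coffee_query,cof_coffee_ref):
--
--     l_query = cof_coffee_query.split('.')
--     l_ref   = cof_coffee_ref.split('.')
--
--     is_match = True
--
--     for (a,b) in list(zip_longest(l_ref,l_query,fillvalue=None)):
--
--         if a == None:
--             break
--         elif a != b:
--             is_match = False
--             break
--         elif a == None and b != None:
--             break
--
--     return is_match
-- ===== SOURCE B (Python) =====
-- def hace_match(cof_coffee_query, cof_coffee_ref):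
--     l_query = cof_coffee_query.split('.')
--     l_ref = cof_coffee_ref.split('.')
--     return l_query[:len(l_ref)] == l_ref
-- ===== Notes on version B (the rewrite author's own statement) =====
-- stated objective: simpler
-- what changed: Replaces the zip_longest loop with a mutable is_match flag and break logic by a single slice-and-compare expression: the leading segments of the query are compared to the full ref segment list.
import Mathlib
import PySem

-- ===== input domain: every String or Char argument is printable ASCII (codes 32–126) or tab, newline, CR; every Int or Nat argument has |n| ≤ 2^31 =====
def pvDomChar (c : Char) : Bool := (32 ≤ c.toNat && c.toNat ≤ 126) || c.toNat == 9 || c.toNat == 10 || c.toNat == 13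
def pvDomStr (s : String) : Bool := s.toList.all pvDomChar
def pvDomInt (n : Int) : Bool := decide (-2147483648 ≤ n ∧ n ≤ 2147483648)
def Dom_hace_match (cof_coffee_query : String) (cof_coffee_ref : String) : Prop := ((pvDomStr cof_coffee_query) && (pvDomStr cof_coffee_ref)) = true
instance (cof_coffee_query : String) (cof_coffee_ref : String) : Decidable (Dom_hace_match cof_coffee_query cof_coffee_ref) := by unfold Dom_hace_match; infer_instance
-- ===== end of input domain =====

-- B replaces A's zip_longest loop with a mutable flag by a single slice-and-compare (simpler).

-- ===== PORT A =====
-- itertools.zip_longest(l_ref, l_query, fillvalue=None)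
def pvZipLongest : List String → List String → List (Option String × Option String)
  | [], [] => []
  | [], b :: bs => (none, some b) :: pvZipLongest [] bs
  | a :: as, [] => (some a, none) :: pvZipLongest as []
  | a :: as, b :: bs => (some a, some b) :: pvZipLongest as bs

-- A's for-loop with break; the accumulator is the is_match flag
def pvLoopA : List (Option String × Option String) → Bool → Bool
  | [], m => m
  | (a, b) :: rest, m =>
    if a = none then m
    else if a ≠ b then false
    else pvLoopA rest m

def hace_match (cof_coffee_query : String) (cof_coffee_ref : String) : Bool :=
  let l_query := ((PySem.Str.split? cof_coffee_query ".").getD [])  -- sep "." ≠ "", so split? is always some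
  let l_ref := ((PySem.Str.split? cof_coffee_ref ".").getD [])  -- sep "." ≠ "", so split? is always some
  pvLoopA (pvZipLongest l_ref l_query) true

-- ===== PORT B =====
def hace_match_alt (cof_coffee_query : String) (cof_coffee_ref : String) : Bool :=
  let l_query := ((PySem.Str.split? cof_coffee_query ".").getD [])  -- sep "." ≠ "", so split? is always some
  let l_ref := ((PySem.Str.split? cof_coffee_ref ".").getD [])  -- sep "." ≠ "", so split? is always some
  decide (l_query.take l_ref.length = l_ref)

-- ===== PRECONDITION & SPEC =====
def Spec_hace_match (cof_coffee_query : String) (cof_coffee_ref : String) (out : Bool) : Prop := out = hace_match_alt cof_coffee_query cof_coffee_ref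
instance (cof_coffee_query : String) (cof_coffee_ref : String) (out : Bool) : Decidable (Spec_hace_match cof_coffee_query cof_coffee_ref out) := by unfold Spec_hace_match; infer_instance

-- ===== CLAIM (what is proved, stated in full; the proofs are below) =====
def Claim_equal_hace_match : Prop := ∀ (cof_coffee_query : String) (cof_coffee_ref : String), Dom_hace_match cof_coffee_query cof_coffee_ref → Spec_hace_match cof_coffee_query cof_coffee_ref (hace_match cof_coffee_query cof_coffee_ref)

-- ===== LEMMAS AND PROOFS =====

theorem pvLoopA_zipLongest (lr lq : List String) :
    pvLoopA (pvZipLongest lr lq) true = decide (lq.take lr.length = lr) := by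
  induction lr generalizing lq with
  | nil =>
    cases lq <;> simp [pvZipLongest, pvLoopA]
  | cons a as ih =>
    cases lq with
    | nil => simp [pvZipLongest, pvLoopA]
    | cons b bs =>
      by_cases hab : a = b
      · subst hab
        simp [pvZipLongest, pvLoopA, ih bs]
      · simp [pvZipLongest, pvLoopA, hab, Ne.symm hab]

-- ===== VERDICT (by name: the statement is the Claim_ definition above) =====
theorem hace_match_spec : Claim_equal_hace_match := by
  intro q r _
  unfold Spec_hace_match hace_match hace_match_alt
  simp [pvLoopA_zipLongest]
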